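-- pv_equiv track=rewrite | github.com/delph123/programming-challenges | AdventOfCode/2016/day20.py | count_allowed_ip_addresses
-- ===== SOURCE A (Python) =====
-- def count_allowed_ip_addresses(ip_range, blocked_ranges):
--     min_ip, max_ip = ip_range
--     blocked_ranges = sorted(blocked_ranges)
--     allowed = 0
--     current_ip = min_ip
--     for a, b in blocked_ranges:
--         if current_ip < a:
--             allowed += a - current_ip
--             current_ip = b + 1
--         else:
--             current_ip = max(current_ip, b + 1)
--     if current_ip <= max_ip:
--         allowed += max_ip - current_ip + 1
--     return allowed
-- ===== SOURCE B (Python) =====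
-- def count_allowed_ip_addresses(ip_range, blocked_ranges):
--     min_ip, max_ip = ip_range
--     # pass 1: fold the sorted ranges into merged, disjoint intervals
--     merged = []
--     cur_iv = None
--     for a, b in sorted(blocked_ranges):
--         if cur_iv is None:
--             cur_iv = (a, b)
--         elif a <= cur_iv[1] + 1:
--             cur_iv = (cur_iv[0], max(cur_iv[1], b))
--         else:
--             merged.append(cur_iv)
--             cur_iv = (a, b)
--     if cur_iv is not None:
--         merged.append(cur_iv)
--     # pass 2: sum the gaps between the merged intervals
--     allowed = 0
--     cur = min_ip
--     for a, b in merged: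
--         gap = a - cur
--         if gap > 0:
--             allowed += gap
--             cur = b + 1
--         else:
--             cur = max(cur, b + 1)
--     return allowed + max(0, max_ip - cur + 1)
-- ===== Notes on version B (the rewrite author's own statement) =====
-- stated objective: alternative
-- what changed: A's single fused sweep over the sorted blocked ranges is split into two explicit passes: first the sorted ranges are folded into a list of merged disjoint intervals (running [start,end] extended while the next start <= end+1), then a second pass sums the uncovered gaps between those intervals, with the final tail clamped via max(0, ...).
import Mathlib
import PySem

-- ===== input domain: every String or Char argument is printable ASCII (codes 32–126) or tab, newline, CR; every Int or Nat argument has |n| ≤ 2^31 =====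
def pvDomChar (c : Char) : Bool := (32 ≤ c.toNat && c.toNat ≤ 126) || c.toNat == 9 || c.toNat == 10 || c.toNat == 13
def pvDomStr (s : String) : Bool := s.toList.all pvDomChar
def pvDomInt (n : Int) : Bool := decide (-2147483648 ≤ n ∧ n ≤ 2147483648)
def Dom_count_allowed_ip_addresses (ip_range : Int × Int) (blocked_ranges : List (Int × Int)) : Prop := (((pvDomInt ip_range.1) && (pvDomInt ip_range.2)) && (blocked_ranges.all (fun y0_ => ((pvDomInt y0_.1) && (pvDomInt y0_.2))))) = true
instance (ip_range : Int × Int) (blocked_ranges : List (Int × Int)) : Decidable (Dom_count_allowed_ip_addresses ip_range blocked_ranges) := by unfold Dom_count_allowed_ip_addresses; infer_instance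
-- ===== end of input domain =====

-- B replaces A's fused sweep by an explicit merge pass (disjoint intervals) followed by a gap-summing pass; alternative decomposition, same asymptotic cost.

-- ===== PORT A =====
-- A's loop body: the state is (allowed, current_ip)
def pvStepA (st : Int × Int) (p : Int × Int) : Int × Int :=
  if st.2 < p.1 then (st.1 + (p.1 - st.2), p.2 + 1) else (st.1, max st.2 (p.2 + 1))

def count_allowed_ip_addresses (ip_range : Int × Int) (blocked_ranges : List (Int × Int)) : Int :=
  let min_ip := ip_range.1
  let max_ip := ip_range.2
  let sortedL := PySem.List.sorted2 blocked_ranges (fun p => p.1) (fun p => p.2) false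
  let fin := sortedL.foldl pvStepA (0, min_ip)
  if fin.2 ≤ max_ip then fin.1 + (max_ip - fin.2 + 1) else fin.1

-- ===== PORT B =====
-- B's merge-pass loop body: the state is (merged, cur_iv)
def pvMergeStep (st : List (Int × Int) × Option (Int × Int)) (p : Int × Int) : List (Int × Int) × Option (Int × Int) :=
  match st.2 with
  | none => (st.1, some p)
  | some se => if p.1 ≤ se.2 + 1 then (st.1, some (se.1, max se.2 p.2)) else (st.1 ++ [se], some p)

-- the trailing 'if cur_iv is not None: merged.append(cur_iv)'
def pvFinalize (st : List (Int × Int) × Option (Int × Int)) : List (Int × Int) :=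
  match st.2 with | none => st.1 | some iv => st.1 ++ [iv]

-- B's gap-summing loop body: the state is (allowed, cur)
def pvStepB (st : Int × Int) (p : Int × Int) : Int × Int :=
  let gap := p.1 - st.2
  if gap > 0 then (st.1 + gap, p.2 + 1) else (st.1, max st.2 (p.2 + 1))

def count_allowed_ip_addresses_alt (ip_range : Int × Int) (blocked_ranges : List (Int × Int)) : Int :=
  let min_ip := ip_range.1
  let max_ip := ip_range.2
  let merged := pvFinalize ((PySem.List.sorted2 blocked_ranges (fun p => p.1) (fun p => p.2) false).foldl pvMergeStep ([], none))
  let fin := merged.foldl pvStepB (0, min_ip)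
  fin.1 + max 0 (max_ip - fin.2 + 1)

-- ===== PRECONDITION & SPEC =====
def Spec_count_allowed_ip_addresses (ip_range : Int × Int) (blocked_ranges : List (Int × Int)) (out : Int) : Prop := out = count_allowed_ip_addresses_alt ip_range blocked_ranges
instance (ip_range : Int × Int) (blocked_ranges : List (Int × Int)) (out : Int) : Decidable (Spec_count_allowed_ip_addresses ip_range blocked_ranges out) := by unfold Spec_count_allowed_ip_addresses; infer_instance

-- ===== CLAIM (what is proved, stated in full; the proofs are below) =====
def Claim_equal_count_allowed_ip_addresses : Prop := ∀ (ip_range : Int × Int) (blocked_ranges : List (Int × Int)), Dom_count_allowed_ip_addresses ip_range blocked_ranges → Spec_count_allowed_ip_addresses ip_range blocked_ranges (count_allowed_ip_addresses ip_range blocked_ranges)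

-- ===== LEMMAS AND PROOFS =====

-- B's gap step computes exactly A's step
lemma pvStepB_eq_stepA (st p : Int × Int) : pvStepB st p = pvStepA st p := by
  rcases st with ⟨al, c⟩; rcases p with ⟨a, b⟩
  simp only [pvStepA, pvStepB]
  split_ifs <;> simp_all [Prod.ext_iff] <;> try omega

-- folding A's step over two ranges that B would merge equals one A-step over the merged range
lemma pvStepA_merge (σ : Int × Int) (s e a b : Int) (h : a ≤ e + 1) :
    pvStepA (pvStepA σ (s, e)) (a, b) = pvStepA σ (s, max e b) := by
  rcases σ with ⟨al, c⟩
  simp only [pvStepA]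
  split_ifs <;> simp_all [Prod.ext_iff] <;> omega

lemma pvMerge_fold (t : List (Int × Int)) : ∀ (m : List (Int × Int)) (s e : Int) (σ : Int × Int),
    (pvFinalize (t.foldl pvMergeStep (m, some (s, e)))).foldl pvStepA σ
      = t.foldl pvStepA (pvStepA (m.foldl pvStepA σ) (s, e)) := by
  induction t with
  | nil => intro m s e σ; simp [pvFinalize, List.foldl_append]
  | cons p t ih =>
    rcases p with ⟨a, b⟩
    intro m s e σ
    simp only [List.foldl_cons, pvMergeStep]
    by_cases h : a ≤ e + 1
    · simp only [h, if_pos]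
      rw [ih, pvStepA_merge (List.foldl pvStepA σ m) s e a b h]
    · simp only [h, if_neg, not_false_iff]
      rw [ih, List.foldl_append]
      simp
lemma pvMerge_main (L : List (Int × Int)) (σ : Int × Int) :
    (pvFinalize (L.foldl pvMergeStep ([], none))).foldl pvStepA σ = L.foldl pvStepA σ := by
  cases L with
  | nil => rfl
  | cons p t =>
    rcases p with ⟨a, b⟩
    simp only [List.foldl_cons, pvMergeStep]
    simpa using pvMerge_fold t [] a b σ

-- ===== VERDICT (by name: the statement is the Claim_ definition above) =====
theorem count_allowed_ip_addresses_spec : Claim_equal_count_allowed_ip_addresses := by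
  intro ip_range blocked_ranges _
  unfold Spec_count_allowed_ip_addresses count_allowed_ip_addresses count_allowed_ip_addresses_alt
  rcases ip_range with ⟨mn, mx⟩
  have hBA : pvStepB = pvStepA := funext fun a => funext fun b => pvStepB_eq_stepA a b
  simp only [hBA]
  rw [pvMerge_main]
  set fin := (PySem.List.sorted2 blocked_ranges (fun p => p.1) (fun p => p.2) false).foldl pvStepA (0, mn) with hfin
  rw [max_def]
  split_ifs <;> omega
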